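-- pv_equiv track=rewrite | github.com/felekekinfe/DSA-Solutions | LinkedList/Parity Sort.py | func
-- ===== SOURCE A (Python) =====
-- def func(arr):
--     for i in range(len(arr)-1):
--         for j in range(i+1,len(arr)):
--             if arr[i]>arr[j]:
--                 if arr[i]%2==0 and arr[j]%2==0:
--                     arr[i],arr[j]=arr[j],arr[i]
--                 if arr[i]%2!=0 and arr[j]%2!=0:
--                     arr[i],arr[j]=arr[j],arr[i]
--     if arr==sorted(arr):
--         return 'yes'
--     return 'no'
-- ===== SOURCE B (Python) =====
-- def func(arr):
--     evens = sorted(x for x in arr if x % 2 == 0)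
--     odds = sorted(x for x in arr if x % 2 != 0)
--     out = []
--     ei = oi = 0
--     for x in arr:
--         if x % 2 == 0:
--             out.append(evens[ei])
--             ei += 1
--         else:
--             out.append(odds[oi])
--             oi += 1
--     return 'yes' if out == sorted(arr) else 'no'
-- ===== Notes on version B (the rewrite author's own statement) =====
-- stated objective: faster
-- what changed: Replaced the O(n^2) nested same-parity selection/bubble pass by sorting the even and odd values separately, reinserting them into their original parity slots in one pass, and comparing to sorted(arr).
import Mathlib
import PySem

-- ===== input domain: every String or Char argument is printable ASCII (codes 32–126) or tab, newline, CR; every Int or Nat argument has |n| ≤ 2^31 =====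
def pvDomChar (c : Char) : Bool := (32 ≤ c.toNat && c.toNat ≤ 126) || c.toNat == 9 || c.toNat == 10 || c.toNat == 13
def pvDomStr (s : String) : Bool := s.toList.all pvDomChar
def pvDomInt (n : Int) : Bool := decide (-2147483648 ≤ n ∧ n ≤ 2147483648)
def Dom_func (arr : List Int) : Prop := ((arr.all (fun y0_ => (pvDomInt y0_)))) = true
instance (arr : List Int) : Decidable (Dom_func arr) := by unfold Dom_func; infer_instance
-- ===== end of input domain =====

-- B replaces A's quadratic nested same-parity selection pass by sorting the even and odd values
-- separately and reinserting them into their original parity slots (objective: faster).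
-- Python's A mutates its argument list in place; the equivalence proved here is about the RETURN value only.

-- ===== PORT A =====
-- arr[i],arr[j] = arr[j],arr[i]  (A only indexes at positions produced by range(len(arr)), which
-- are always in bounds, so getD 0 is exact for Python's arr[_])
def pySwapA (l : List Int) (i j : Nat) : List Int :=
  (l.set i (l.getD j 0)).set j (l.getD i 0)

-- the second 'if' of the inner loop body, re-reading the possibly already swapped values
def innerBody2A (i : Nat) (l1 : List Int) (j : Nat) : List Int :=
  if PySem.Int.mod (l1.getD i 0) 2 != 0 && PySem.Int.mod (l1.getD j 0) 2 != 0
  then pySwapA l1 i j else l1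

-- body of the inner 'for j' loop: both ifs, guarded by arr[i] > arr[j]
def innerBodyA (i : Nat) (l : List Int) (j : Nat) : List Int :=
  if l.getD i 0 > l.getD j 0 then
    innerBody2A i (if PySem.Int.mod (l.getD i 0) 2 == 0 && PySem.Int.mod (l.getD j 0) 2 == 0
                   then pySwapA l i j else l) j
  else l

def func (arr : List Int) : String :=
  let n := arr.length
  let r := (List.range (n - 1)).foldl
    (fun l i => (List.range' (i + 1) (n - (i + 1))).foldl (innerBodyA i) l) arr
  if r = PySem.List.sorted r (fun x => x) false then "yes" else "no"

-- ===== PORT B =====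
-- the 'for x in arr' loop of Source B: consume the sorted evens/odds in order (the indices ei/oi
-- never run past the end of evens/odds, so headD 0 / tail are exact for evens[ei] / odds[oi])
def interleaveB (l es os : List Int) : List Int :=
  match l with
  | [] => []
  | x :: xs =>
    if PySem.Int.mod x 2 == 0 then es.headD 0 :: interleaveB xs es.tail os
    else os.headD 0 :: interleaveB xs es os.tail

def func_alt (arr : List Int) : String :=
  let evens := PySem.List.sorted (arr.filter (fun x => PySem.Int.mod x 2 == 0)) (fun x => x) false
  let odds  := PySem.List.sorted (arr.filter (fun x => PySem.Int.mod x 2 != 0)) (fun x => x) false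
  let out := interleaveB arr evens odds
  if out = PySem.List.sorted arr (fun x => x) false then "yes" else "no"

-- ===== PRECONDITION & SPEC =====
def Spec_func (arr : List Int) (out : String) : Prop := out = func_alt arr
instance (arr : List Int) (out : String) : Decidable (Spec_func arr out) := by unfold Spec_func; infer_instance

-- ===== CLAIM (what is proved, stated in full; the proofs are below) =====
def Claim_equal_func : Prop := ∀ (arr : List Int), Dom_func arr → Spec_func arr (func arr)

-- ===== LEMMAS AND PROOFS =====

-- value parity as A's and B's tests see it (Python x % 2 == 0)
def pe (x : Int) : Bool := PySem.Int.mod x 2 == 0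

lemma length_pySwapA (l : List Int) (i j : Nat) : (pySwapA l i j).length = l.length := by
  simp [pySwapA]

lemma getD_pySwapA_left (l : List Int) {i j : Nat} (hij : i ≠ j) (hi : i < l.length) :
    (pySwapA l i j).getD i 0 = l.getD j 0 := by
  simp [pySwapA, List.getD_eq_getElem?_getD, List.getElem?_set_ne (Ne.symm hij), List.getElem?_set_self hi]

lemma getD_pySwapA_right (l : List Int) {i j : Nat} (hj : j < l.length) :
    (pySwapA l i j).getD j 0 = l.getD i 0 := by
  rw [pySwapA, List.getD_eq_getElem?_getD, List.getElem?_set_self (by simpa using hj)]; rfl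

lemma getD_pySwapA_other (l : List Int) {i j k : Nat} (hki : k ≠ i) (hkj : k ≠ j) :
    (pySwapA l i j).getD k 0 = l.getD k 0 := by
  simp [pySwapA, List.getD_eq_getElem?_getD, List.getElem?_set_ne (Ne.symm hkj), List.getElem?_set_ne (Ne.symm hki)]

lemma cons_set_perm (x : Int) : ∀ (xs : List Int) (k : Nat), k < xs.length →
    List.Perm (xs.getD k 0 :: xs.set k x) (x :: xs)
  | y :: t, 0, _ => by simpa using List.Perm.swap x y t
  | y :: t, k + 1, hk => by
    have ih := cons_set_perm x t k (by simpa using hk)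
    refine List.Perm.trans (List.Perm.swap y (t.getD k 0) (t.set k x)) ?_
    exact List.Perm.trans (ih.cons y) (List.Perm.swap x y t)

lemma perm_pySwapA : ∀ (l : List Int) {i j : Nat}, i < j → j < l.length →
    List.Perm (pySwapA l i j) l
  | x :: xs, 0, j + 1, _, hj => by
    simpa [pySwapA] using cons_set_perm x xs j (by simpa using hj)
  | x :: xs, i + 1, j + 1, hij, hj => by
    have ih := perm_pySwapA xs (i := i) (j := j) (by omega) (by simpa using hj)
    simpa [pySwapA] using ih.cons x

lemma map_pe_pySwapA (l : List Int) {i j : Nat} (hij : i < j) (hj : j < l.length)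
    (hp : pe (l.getD i 0) = pe (l.getD j 0)) :
    (pySwapA l i j).map pe = l.map pe := by
  have hi : i < l.length := lt_trans hij hj
  have e1 : l.getD i 0 = l[i]'hi := List.getD_eq_getElem _ _ hi
  have e2 : l.getD j 0 = l[j]'hj := List.getD_eq_getElem _ _ hj
  have hp' : pe (l[i]'hi) = pe (l[j]'hj) := by rwa [e1, e2] at hp
  rw [pySwapA, e1, e2, List.map_set, List.map_set]
  apply List.ext_getElem?
  intro k
  simp only [List.getElem?_set, List.length_set, List.length_map, List.getElem?_map]
  split_ifs with h1 h2
  · subst h1; simp [hj, hp']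
  · subst h2; simp [hi, hp']
  · rfl

-- A's double-guarded body is: swap iff strictly out of order and same parity
lemma innerBodyA_eq (l : List Int) {i j : Nat} (hij : i < j) (hj : j < l.length) :
    innerBodyA i l j =
      if l.getD j 0 < l.getD i 0 ∧ pe (l.getD i 0) = pe (l.getD j 0)
      then pySwapA l i j else l := by
  have hi : i < l.length := lt_trans hij hj
  have hne : i ≠ j := Nat.ne_of_lt hij
  have hev : ∀ x : Int, (PySem.Int.mod x 2 == 0) = pe x := fun _ => rfl
  have hodd : ∀ x : Int, (PySem.Int.mod x 2 != 0) = !pe x := fun _ => rfl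
  rw [innerBodyA]
  by_cases h1 : l.getD i 0 > l.getD j 0
  · rw [if_pos h1]
    cases hpa : pe (l.getD i 0) <;> cases hpb : pe (l.getD j 0)
    · rw [if_neg (by rw [hev, hev, hpa]; simp), innerBody2A,
        if_pos (by rw [hodd, hodd, hpa, hpb]; rfl),
        if_pos ⟨h1, rfl⟩]
    · rw [if_neg (by rw [hev, hev, hpa]; simp), innerBody2A,
        if_neg (by rw [hodd, hodd, hpb]; simp),
        if_neg (fun h => by simp at h)]
    · rw [if_neg (by rw [hev, hev, hpb]; simp), innerBody2A,
        if_neg (by rw [hodd, hodd, hpa]; simp),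
        if_neg (fun h => by simp at h)]
    · rw [if_pos (by rw [hev, hev, hpa, hpb]; rfl), innerBody2A,
        if_neg (by rw [hodd, hodd, getD_pySwapA_left l hne hi, hpb]; simp),
        if_pos ⟨h1, rfl⟩]
  · rw [if_neg h1, if_neg (fun h => h1 h.1)]

lemma pe_getD_eq {r l : List Int} (hlen : r.length = l.length) (h : r.map pe = l.map pe)
    {k : Nat} (hk : k < l.length) : pe (r.getD k 0) = pe (l.getD k 0) := by
  have hk' : k < r.length := by omega
  rw [List.getD_eq_getElem _ _ hk', List.getD_eq_getElem _ _ hk]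
  have h2 := congrArg (fun t => t[k]?) h
  simpa [List.getElem?_map, List.getElem?_eq_getElem, hk, hk'] using h2

-- inner loop: one selection pass at position i over indices [s, s+m): it permutes the
-- suffix values, preserves the parity pattern, and leaves position i minimal among the
-- same-parity values it saw
lemma inner_aux (i : Nat) : ∀ (m s : Nat) (l : List Int), i < s → s + m ≤ l.length →
    ((List.range' s m).foldl (innerBodyA i) l).length = l.length ∧
    List.Perm ((List.range' s m).foldl (innerBodyA i) l) l ∧
    ((List.range' s m).foldl (innerBodyA i) l).map pe = l.map pe ∧
    (∀ k, k ≠ i → (k < s ∨ s + m ≤ k) →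
      ((List.range' s m).foldl (innerBodyA i) l).getD k 0 = l.getD k 0) ∧
    (∀ k, s ≤ k → k < s + m →
      pe (((List.range' s m).foldl (innerBodyA i) l).getD k 0) = pe (l.getD i 0) →
      ((List.range' s m).foldl (innerBodyA i) l).getD i 0 ≤
        ((List.range' s m).foldl (innerBodyA i) l).getD k 0) ∧
    ((List.range' s m).foldl (innerBodyA i) l).getD i 0 ≤ l.getD i 0 := by
  intro m
  induction m with
  | zero =>
    intro s l his hlen
    refine ⟨rfl, List.Perm.refl _, rfl, fun k _ _ => rfl, fun k hk1 hk2 _ => by omega, le_refl _⟩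
  | succ m ih =>
    intro s l his hlen
    have hs : s < l.length := by omega
    have hne : i ≠ s := Nat.ne_of_lt his
    have hi : i < l.length := by omega
    rw [List.range'_succ, List.foldl_cons]
    have hb := innerBodyA_eq l (i := i) (j := s) his hs
    -- facts about the one-step list l1 := innerBodyA i l s
    by_cases hswap : l.getD s 0 < l.getD i 0 ∧ pe (l.getD i 0) = pe (l.getD s 0)
    · rw [if_pos hswap] at hb
      have hl1len : (innerBodyA i l s).length = l.length := by rw [hb, length_pySwapA]
      have hl1perm : List.Perm (innerBodyA i l s) l := by rw [hb]; exact perm_pySwapA l his hs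
      have hl1map : (innerBodyA i l s).map pe = l.map pe := by
        rw [hb]; exact map_pe_pySwapA l his hs hswap.2
      have hl1i : (innerBodyA i l s).getD i 0 = l.getD s 0 := by
        rw [hb]; exact getD_pySwapA_left l hne hi
      have hl1s : (innerBodyA i l s).getD s 0 = l.getD i 0 := by
        rw [hb]; exact getD_pySwapA_right l hs
      have hl1o : ∀ k, k ≠ i → k ≠ s → (innerBodyA i l s).getD k 0 = l.getD k 0 := by
        intro k h1 h2; rw [hb]; exact getD_pySwapA_other l h1 h2
      obtain ⟨ihlen, ihperm, ihmap, ihut, ihmin, ihle⟩ :=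
        ih (s + 1) (innerBodyA i l s) (by omega) (by omega)
      refine ⟨by rw [ihlen, hl1len], ihperm.trans hl1perm, ihmap.trans hl1map, ?_, ?_, ?_⟩
      · intro k hk1 hk2
        rw [ihut k hk1 (by omega), hl1o k hk1 (by omega)]
      · intro k hks hkm hpk
        by_cases hk : k = s
        · have h1 := ihut k (by omega) (by omega)
          rw [h1, hk, hl1s]
          have h2 : (innerBodyA i l s).getD i 0 ≤ l.getD i 0 := by
            rw [hl1i]; exact le_of_lt hswap.1
          exact le_trans ihle h2
        · refine ihmin k (by omega) (by omega) ?_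
          rw [hpk, hl1i, ← hswap.2]
      · have h2 : (innerBodyA i l s).getD i 0 ≤ l.getD i 0 := by
          rw [hl1i]; exact le_of_lt hswap.1
        exact le_trans ihle h2
    · rw [if_neg hswap] at hb
      rw [hb]
      obtain ⟨ihlen, ihperm, ihmap, ihut, ihmin, ihle⟩ := ih (s + 1) l (by omega) (by omega)
      refine ⟨ihlen, ihperm, ihmap, ?_, ?_, ihle⟩
      · intro k hk1 hk2
        exact ihut k hk1 (by omega)
      · intro k hks hkm hpk
        by_cases hk : k = s
        · have h1 := ihut k (by omega) (by omega)
          rw [h1]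
          have hle2 : l.getD i 0 ≤ l.getD k 0 := by
            rcases lt_or_ge (l.getD k 0) (l.getD i 0) with h | h
            · exfalso
              refine hswap ⟨by rw [← hk]; exact h, ?_⟩
              rw [← hk]
              rw [h1] at hpk
              exact hpk.symm
            · exact h
          exact le_trans ihle hle2
        · exact ihmin k (by omega) (by omega) hpk

lemma take_eq_of_getD {l1 l : List Int} (i : Nat) (hlen : l1.length = l.length)
    (hle : i ≤ l.length) (h : ∀ k, k < i → l1.getD k 0 = l.getD k 0) :
    l1.take i = l.take i := by
  apply List.ext_getElem
  · simp [hlen]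
  · intro k h1 h2
    have hk : k < i := by simp at h1; omega
    have hk1 : k < l1.length := by omega
    have hk2 : k < l.length := by omega
    have := h k hk
    rw [List.getD_eq_getElem _ _ hk1, List.getD_eq_getElem _ _ hk2] at this
    simpa [List.getElem_take] using this

lemma perm_drop_of_take_eq {l1 l : List Int} (i : Nat) (h : List.Perm l1 l)
    (ht : l1.take i = l.take i) : List.Perm (l1.drop i) (l.drop i) := by
  have e1 : l1.take i ++ l1.drop i = l1 := List.take_append_drop i l1
  have e2 : l.take i ++ l.drop i = l := List.take_append_drop i l
  have h1 : List.Perm (l.take i ++ l1.drop i) (l.take i ++ l.drop i) := by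
    rw [e2, ← ht, e1]
    exact h
  exact (List.perm_append_left_iff _).mp h1

-- outer loop invariant: every position < i holds a value ≤ all later same-parity values
lemma outer_aux (n : Nat) : ∀ (m i : Nat) (l : List Int), l.length = n → i + m ≤ n →
    (∀ a b, a < i → a < b → b < n → pe (l.getD a 0) = pe (l.getD b 0) →
      l.getD a 0 ≤ l.getD b 0) →
    (((List.range' i m).foldl
        (fun acc i' => (List.range' (i' + 1) (n - (i' + 1))).foldl (innerBodyA i') acc) l).length = n ∧
     List.Perm ((List.range' i m).foldl
        (fun acc i' => (List.range' (i' + 1) (n - (i' + 1))).foldl (innerBodyA i') acc) l) l ∧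
     ((List.range' i m).foldl
        (fun acc i' => (List.range' (i' + 1) (n - (i' + 1))).foldl (innerBodyA i') acc) l).map pe = l.map pe ∧
     (∀ a b, a < i + m → a < b → b < n →
       pe (((List.range' i m).foldl
        (fun acc i' => (List.range' (i' + 1) (n - (i' + 1))).foldl (innerBodyA i') acc) l).getD a 0) =
       pe (((List.range' i m).foldl
        (fun acc i' => (List.range' (i' + 1) (n - (i' + 1))).foldl (innerBodyA i') acc) l).getD b 0) →
       ((List.range' i m).foldl
        (fun acc i' => (List.range' (i' + 1) (n - (i' + 1))).foldl (innerBodyA i') acc) l).getD a 0 ≤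
       ((List.range' i m).foldl
        (fun acc i' => (List.range' (i' + 1) (n - (i' + 1))).foldl (innerBodyA i') acc) l).getD b 0)) := by
  intro m
  induction m with
  | zero =>
    intro i l hlen _ hinv
    exact ⟨hlen, List.Perm.refl _, rfl, fun a b ha => hinv a b (by omega)⟩
  | succ m ih =>
    intro i l hlen hm hinv
    rw [List.range'_succ, List.foldl_cons]
    have hi1 : i + 1 ≤ l.length := by omega
    obtain ⟨l1len, l1perm, l1map, l1ut, l1min, l1le⟩ :=
      inner_aux i (n - (i + 1)) (i + 1) l (by omega) (by omega)
    set l1 := (List.range' (i + 1) (n - (i + 1))).foldl (innerBodyA i) l with hl1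
    have hinv1 : ∀ a b, a < i + 1 → a < b → b < n → pe (l1.getD a 0) = pe (l1.getD b 0) →
        l1.getD a 0 ≤ l1.getD b 0 := by
      intro a b ha hab hb hpe
      by_cases hai : a = i
      · rw [hai]
        rw [hai] at hpe
        have hpi : pe (l1.getD i 0) = pe (l.getD i 0) :=
          pe_getD_eq l1len l1map (k := i) (by omega)
        refine l1min b (by omega) (by omega) ?_
        rw [← hpe]
        exact hpi
      · have ha' : a < i := by omega
        have hua : l1.getD a 0 = l.getD a 0 := l1ut a (by omega) (by omega)
        by_cases hb2 : b < i
        · have hub : l1.getD b 0 = l.getD b 0 := l1ut b (by omega) (by omega)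
          rw [hua, hub]
          rw [hua, hub] at hpe
          exact hinv a b ha' hab hb hpe
        · -- b ≥ i: the value at b is one of the old same-parity values at positions ≥ i
          have hbn : b < l1.length := by omega
          have hbl : b < l.length := by omega
          have htk : l1.take i = l.take i :=
            take_eq_of_getD i l1len (by omega)
              (fun k hk => l1ut k (by omega) (by omega))
          have hdp : List.Perm (l1.drop i) (l.drop i) := perm_drop_of_take_eq i l1perm htk
          have hvmem : l1.getD b 0 ∈ l1.drop i := by
            rw [List.getD_eq_getElem _ _ hbn]
            have h2 : b - i < (l1.drop i).length := by simp; omega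
            have h3 : (l1.drop i)[b - i]'h2 = l1[b]'hbn := by
              rw [List.getElem_drop]
              congr 1
              omega
            rw [← h3]
            exact List.getElem_mem h2
          have hvf : l1.getD b 0 ∈ (l1.drop i).filter (fun x => pe x == pe (l1.getD b 0)) := by
            rw [List.mem_filter]
            exact ⟨hvmem, by simp⟩
          have hvf2 : l1.getD b 0 ∈ (l.drop i).filter (fun x => pe x == pe (l1.getD b 0)) :=
            (hdp.filter _).mem_iff.mp hvf
          rw [List.mem_filter] at hvf2
          obtain ⟨hvm, hvpe⟩ := hvf2
          obtain ⟨jj, hjj, hjv⟩ := List.mem_iff_getElem.mp hvm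
          have hc : i + jj < l.length := by simp at hjj; omega
          have hcv : l.getD (i + jj) 0 = l1.getD b 0 := by
            rw [List.getD_eq_getElem _ _ hc, ← hjv, List.getElem_drop]
          rw [hua]
          rw [← hcv]
          refine hinv a (i + jj) ha' (by omega) (by omega) ?_
          rw [hcv]
          rw [hua] at hpe
          exact hpe
    obtain ⟨rlen, rperm, rmap, rmin⟩ := ih (i + 1) l1 (by rw [l1len, hlen]) (by omega) hinv1
    exact ⟨rlen, rperm.trans l1perm, rmap.trans l1map,
      fun a b ha hab hb => rmin a b (by omega) hab hb⟩

-- reinserting a list's own filtered subsequences reproduces the list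
lemma interleaveB_self : ∀ (r : List Int),
    interleaveB r (r.filter pe) (r.filter (fun x => !pe x)) = r := by
  intro r
  induction r with
  | nil => rfl
  | cons x xs ih =>
    have hc : (PySem.Int.mod x 2 == 0) = pe x := rfl
    cases hx : pe x
    · simp only [interleaveB, List.filter_cons, hc, hx, Bool.not_false, Bool.false_eq_true,
        if_false, if_true, List.headD_cons, List.tail_cons]
      rw [ih]
    · simp only [interleaveB, List.filter_cons, hc, hx, Bool.not_true, Bool.false_eq_true,
        if_false, if_true, List.headD_cons, List.tail_cons]
      rw [ih]

-- interleaveB only looks at the parity pattern of its first argument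
lemma interleaveB_congr : ∀ (l l' es os : List Int), l.map pe = l'.map pe →
    interleaveB l es os = interleaveB l' es os := by
  intro l
  induction l with
  | nil =>
    intro l' es os h
    have : l' = [] := by simpa using (List.map_eq_nil_iff.mp h.symm)
    rw [this]
  | cons x xs ih =>
    intro l' es os h
    cases l' with
    | nil => simp at h
    | cons y ys =>
      simp only [List.map_cons, List.cons.injEq] at h
      have hxy : (PySem.Int.mod x 2 == 0) = (PySem.Int.mod y 2 == 0) := h.1
      rw [interleaveB, interleaveB, hxy]
      cases hy : (PySem.Int.mod y 2 == 0) <;>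
        simp [ih _ _ _ h.2]

lemma func_eq_alt (arr : List Int) : func arr = func_alt arr := by
  have hpeq : (fun x : Int => PySem.Int.mod x 2 == 0) = pe := rfl
  have hoeq : (fun x : Int => PySem.Int.mod x 2 != 0) = (fun x => !pe x) := rfl
  obtain ⟨rlen, rperm, rmap, rmin⟩ :=
    outer_aux arr.length (arr.length - 1) 0 arr rfl (by omega)
      (fun a b ha => absurd ha (Nat.not_lt_zero a))
  rw [func, func_alt]
  simp only [hpeq, hoeq, List.range_eq_range']
  set r := (List.range' 0 (arr.length - 1)).foldl
    (fun l i => (List.range' (i + 1) (arr.length - (i + 1))).foldl (innerBodyA i) l) arr with hr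
  -- pairwise: same-parity entries appear in nondecreasing order in r
  have hpw : r.Pairwise (fun x y => pe x = pe y → x ≤ y) := by
    rw [List.pairwise_iff_getElem]
    intro a b ha hb hab hpe2
    have hb' : b < arr.length := by omega
    have h := rmin a b (by omega) hab hb'
    rw [List.getD_eq_getElem _ _ ha, List.getD_eq_getElem _ _ hb] at h
    exact h hpe2
  have hev : (r.filter pe).Pairwise (fun x y : Int => x ≤ y) := by
    refine (hpw.filter pe).imp_of_mem ?_
    intro a b hma hmb hab
    exact hab (by rw [(List.mem_filter.mp hma).2, (List.mem_filter.mp hmb).2])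
  have hod : (r.filter (fun x => !pe x)).Pairwise (fun x y : Int => x ≤ y) := by
    refine (hpw.filter _).imp_of_mem ?_
    intro a b hma hmb hab
    have h1 := (List.mem_filter.mp hma).2
    have h2 := (List.mem_filter.mp hmb).2
    simp only [Bool.not_eq_true'] at h1 h2
    exact hab (by rw [h1, h2])
  have hevq : PySem.List.sorted (arr.filter pe) (fun x => x) false = r.filter pe :=
    PySem.List.sorted_id_eq_of_perm_of_pairwise _ _ (rperm.filter pe) hev
  have hodq : PySem.List.sorted (arr.filter (fun x => !pe x)) (fun x => x) false
      = r.filter (fun x => !pe x) :=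
    PySem.List.sorted_id_eq_of_perm_of_pairwise _ _ (rperm.filter _) hod
  have hout : interleaveB arr (PySem.List.sorted (arr.filter pe) (fun x => x) false)
      (PySem.List.sorted (arr.filter (fun x => !pe x)) (fun x => x) false) = r := by
    rw [hevq, hodq, interleaveB_congr arr r _ _ rmap.symm, interleaveB_self r]
  have hsort : PySem.List.sorted arr (fun x => x) false = PySem.List.sorted r (fun x => x) false :=
    (PySem.List.sorted_eq_sorted_of_perm r arr (fun x => x) (fun a b h => h) rperm).symm
  rw [hout, hsort]

-- ===== VERDICT (by name: the statement is the Claim_ definition above) =====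
theorem func_spec : Claim_equal_func := by
  intro arr _
  exact func_eq_alt arr
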